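-- pv_equiv track=rewrite | github.com/Muosvr/30DaysOfCode | LetsReview.py | oddvsEven
-- ===== SOURCE A (Python) =====
-- def oddvsEven(input):
--     inputArr = list(input)
--     oddArr = []
--     evenArr = []
--
--     for i in range(len(inputArr)):
--         if i % 2 == 0:
--             evenArr.append(inputArr[i])
--         else:
--             oddArr.append(inputArr[i])
--
--     return "".join(evenArr) + " " + "".join(oddArr)
-- ===== SOURCE B (Python) =====
-- def oddvsEven(input):
--     arr = list(input)
--     return "".join(arr[::2]) + " " + "".join(arr[1::2])
-- ===== Notes on version B (the rewrite author's own statement) =====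
-- stated objective: idiomatic
-- what changed: Replaces the indexed loop with its i % 2 branch and two accumulator lists by two independent strided slices arr[::2] and arr[1::2] joined directly.
import Mathlib
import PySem

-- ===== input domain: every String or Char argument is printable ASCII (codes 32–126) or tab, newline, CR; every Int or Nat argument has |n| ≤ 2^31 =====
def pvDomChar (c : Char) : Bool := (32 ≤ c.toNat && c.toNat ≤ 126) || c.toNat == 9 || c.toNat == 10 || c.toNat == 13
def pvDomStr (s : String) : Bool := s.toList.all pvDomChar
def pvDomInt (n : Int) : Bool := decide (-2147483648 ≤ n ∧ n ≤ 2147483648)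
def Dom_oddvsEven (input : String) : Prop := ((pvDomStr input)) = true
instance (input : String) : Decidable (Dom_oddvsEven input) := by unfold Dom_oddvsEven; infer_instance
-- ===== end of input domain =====

-- B replaces A's indexed loop with its i % 2 branch and two accumulator lists by two
-- strided slices arr[::2] and arr[1::2] (objective: idiomatic; same O(n) cost).

-- ===== PORT A =====
-- for i in range(len(inputArr)): if i % 2 == 0: evenArr.append(inputArr[i]) else: oddArr.append(inputArr[i]);
-- the state is (oddArr, evenArr), in Python's declaration order; inputArr[i] with i always
-- in range is ported as pyGetD with an unused default.
def oddvsEven (input : String) : String :=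
  let inputArr := input.toList
  let st := (PySem.List.pyRange 0 (PySem.List.len inputArr)).foldl
      (fun (acc : List Char × List Char) i =>
        if PySem.Int.mod i 2 == 0 then (acc.1, acc.2 ++ [PySem.List.pyGetD inputArr i ' '])
        else (acc.1 ++ [PySem.List.pyGetD inputArr i ' '], acc.2))
      ([], [])
  -- "".join(evenArr) + " " + "".join(oddArr): joining 1-char strings then concatenating
  String.ofList (st.2 ++ ' ' :: st.1)

-- ===== PORT B =====
-- arr[::2] and arr[1::2]; step 2 ≠ 0, so slice? always returns some and getD's default is unused.
def oddvsEven_alt (input : String) : String :=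
  let arr := input.toList
  let evens := (PySem.List.slice? arr none none 2).getD []
  let odds := (PySem.List.slice? arr (some 1) none 2).getD []
  String.ofList (evens ++ ' ' :: odds)

-- ===== PRECONDITION & SPEC =====
def Spec_oddvsEven (input : String) (out : String) : Prop := out = oddvsEven_alt input
instance (input : String) (out : String) : Decidable (Spec_oddvsEven input out) := by unfold Spec_oddvsEven; infer_instance

-- ===== CLAIM (what is proved, stated in full; the proofs are below) =====
def Claim_equal_oddvsEven : Prop := ∀ (input : String), Dom_oddvsEven input → Spec_oddvsEven input (oddvsEven input)

-- ===== LEMMAS AND PROOFS =====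

-- (elements at even indices, elements at odd indices) of a list
def pvParts : List Char → List Char × List Char
  | [] => ([], [])
  | a :: t => (a :: (pvParts t).2, (pvParts t).1)

lemma core_evens : ∀ (xs : List Char),
    List.filterMap (fun k => xs[2*k]?) (List.range ((xs.length+1)/2)) = (pvParts xs).1
  | [] => by simp [pvParts]
  | [a] => by simp [pvParts]
  | a :: b :: t => by
    have ih := core_evens t
    have h1 : ((a :: b :: t).length + 1)/2 = ((t.length+1)/2) + 1 := by simp; omega
    rw [h1, List.range_succ_eq_map, List.filterMap_cons, List.filterMap_map]
    simp only [pvParts]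
    simp only [Nat.mul_zero, List.getElem?_cons_zero, Function.comp]
    rw [show (fun k => (a :: b :: t)[2 * Nat.succ k]?) = fun k => t[2*k]? from by
      funext k; have : 2 * Nat.succ k = (2*k)+1+1 := by omega
      rw [this]; simp]
    simp [ih]

lemma core_odds : ∀ (xs : List Char),
    List.filterMap (fun k => xs[2*k+1]?) (List.range (xs.length/2)) = (pvParts xs).2
  | [] => by simp [pvParts]
  | [a] => by simp [pvParts]
  | a :: b :: t => by
    have ih := core_odds t
    have h1 : (a :: b :: t).length/2 = t.length/2 + 1 := by simp; omega
    rw [h1, List.range_succ_eq_map, List.filterMap_cons, List.filterMap_map]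
    simp only [pvParts, Nat.mul_zero, Nat.zero_add, List.getElem?_cons_succ, List.getElem?_cons_zero, Function.comp]
    rw [show (fun x => (b :: t)[2 * Nat.succ x]?) = fun k => t[2*k+1]? from by
      funext k; have : 2 * Nat.succ k = (2*k+1)+1 := by omega
      rw [this]; simp]
    simp [ih]

-- B's slice arr[::2] is exactly the even-index elements
lemma slice_evens (xs : List Char) :
    PySem.List.slice? xs none none 2 = some (pvParts xs).1 := by
  simp only [PySem.List.slice?, PySem.List.sliceIndices]
  norm_num
  have hc : (if 0 < xs.length then (((xs.length : Int) + 2 - 1) / 2).toNat else 0)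
      = (xs.length + 1)/2 := by split <;> omega
  rw [hc, show (fun (x : Nat) => xs[((2 : Int) * ↑x).toNat]?) = fun k => xs[2*k]? from by
    funext k; congr 1]
  exact core_evens xs

-- B's slice arr[1::2] is exactly the odd-index elements
lemma slice_odds (xs : List Char) :
    PySem.List.slice? xs (some 1) none 2 = some (pvParts xs).2 := by
  simp only [PySem.List.slice?, PySem.List.sliceIndices]
  norm_num
  cases xs with
  | nil => simp [pvParts]
  | cons a t =>
    have hmin : min 1 ((a :: t).length : Int) = 1 := by simp
    rw [hmin]
    have hc : (if 1 < (a :: t).length then ((((a :: t).length : Int) - 1 + 2 - 1) / 2).toNat else 0)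
        = (a :: t).length / 2 := by
      split <;> simp_all
      omega
    rw [hc, show (fun (x : Nat) => (a :: t)[((1 : Int) + 2 * ↑x).toNat]?) = fun k => (a :: t)[2*k+1]? from by
      funext k; congr 1; omega]
    exact core_odds (a :: t)

-- A's loop over range(len(arr)), started at index j with the suffix arr.drop j left to
-- process, appends the parity partition of that suffix to its accumulators.
lemma foldA_gen (arr : List Char) : ∀ (l : List Char) (j : Nat) (o e : List Char), arr.drop j = l →
    ((List.range' j l.length).foldl
      (fun (acc : List Char × List Char) (k : Nat) =>
        if PySem.Int.mod ↑k 2 == 0 then (acc.1, acc.2 ++ [PySem.List.pyGetD arr ↑k ' '])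
        else (acc.1 ++ [PySem.List.pyGetD arr ↑k ' '], acc.2)) (o, e))
    = if j % 2 = 0 then (o ++ (pvParts l).2, e ++ (pvParts l).1)
      else (o ++ (pvParts l).1, e ++ (pvParts l).2) := by
  intro l
  induction l with
  | nil => intro j o e _; simp [pvParts]
  | cons a t ih =>
    intro j o e hj
    have hget : arr[j]? = some a := by
      have := @List.getElem?_drop Char arr j 0
      rw [hj] at this; simpa using this.symm
    have hdrop : arr.drop (j+1) = t := by
      have : arr.drop (j+1) = (arr.drop j).drop 1 := by rw [List.drop_drop]
      rw [this, hj]; rfl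
    have hmod : PySem.Int.mod (↑j) 2 = ↑(j % 2) := by
      rw [PySem.Int.mod_eq_emod_of_pos (by norm_num)]; omega
    have hgd : PySem.List.pyGetD arr (↑j) ' ' = a := by
      rw [PySem.List.pyGetD_natCast]; simp [List.getD, hget]
    simp only [List.length_cons]
    rw [List.range'_succ, List.foldl_cons]
    by_cases hp : j % 2 = 0
    · have hcond : (PySem.Int.mod (↑j) 2 == 0) = true := by rw [hmod, hp]; rfl
      simp only [hcond, hgd]
      simp only [if_true]
      have ih' := ih (j+1) o (e ++ [a]) hdrop
      have hp1 : ¬ (j+1) % 2 = 0 := by omega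
      rw [ih', if_neg hp1, if_pos hp]
      simp [pvParts]
    · have hcond : (PySem.Int.mod (↑j) 2 == 0) = false := by
        rw [hmod]; have : j % 2 = 1 := by omega
        rw [this]; rfl
      simp only [hcond, hgd]
      simp only [Bool.false_eq_true, if_false]
      have ih' := ih (j+1) (o ++ [a]) e hdrop
      have hp1 : (j+1) % 2 = 0 := by omega
      rw [ih', if_pos hp1, if_neg hp]
      simp [pvParts]

-- A's loop computes (oddArr, evenArr) = (odd-index elements, even-index elements)
lemma foldA_eq (arr : List Char) :
    ((PySem.List.pyRange 0 (PySem.List.len arr)).foldl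
      (fun (acc : List Char × List Char) i =>
        if PySem.Int.mod i 2 == 0 then (acc.1, acc.2 ++ [PySem.List.pyGetD arr i ' '])
        else (acc.1 ++ [PySem.List.pyGetD arr i ' '], acc.2))
      ([], [])) = ((pvParts arr).2, (pvParts arr).1) := by
  have hlen : PySem.List.len arr = (arr.length : Int) := rfl
  rw [hlen, PySem.List.pyRange_zero_natCast, List.foldl_map, List.range_eq_range']
  have := foldA_gen arr arr 0 [] [] (by simp)
  simpa using this

-- ===== VERDICT (by name: the statement is the Claim_ definition above) =====
theorem oddvsEven_spec : Claim_equal_oddvsEven := by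
  intro input _
  show _ = _
  unfold oddvsEven oddvsEven_alt
  simp only [foldA_eq, slice_evens, slice_odds, Option.getD_some]
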